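-- pv_equiv track=rewrite | github.com/Rasulid/ba-semester-2 | FSP-R-2-22/semestr_2/lesson_26/class_26.py | infinite
-- ===== SOURCE A (Python) =====
-- def infinite(lst, iterations):
--     result = ''
--     iter_lst = iter(lst) # [0, 7] iteration -> next
--     if lst:
--         for i in range(iterations):
--             try:
--                 result += str(next(iter_lst))
--             except StopIteration:
--                 iter_lst = iter(lst)
--                 result += str(next(iter_lst))
--
--     return result
-- ===== SOURCE B (Python) =====
-- def infinite(lst, iterations):
--     if not lst or iterations <= 0:
--         return ''
--     q, r = divmod(iterations, len(lst))
--     return ''.join(str(x) for x in lst * q + lst[:r])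
-- ===== Notes on version B (the rewrite author's own statement) =====
-- stated objective: alternative
-- what changed: Replaces A's per-iteration loop with iterator-reset logic by a closed-form bulk construction: divmod(iterations, len(lst)) gives whole cycles q and remainder r, and the result is one join over lst*q + lst[:r].
import Mathlib
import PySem

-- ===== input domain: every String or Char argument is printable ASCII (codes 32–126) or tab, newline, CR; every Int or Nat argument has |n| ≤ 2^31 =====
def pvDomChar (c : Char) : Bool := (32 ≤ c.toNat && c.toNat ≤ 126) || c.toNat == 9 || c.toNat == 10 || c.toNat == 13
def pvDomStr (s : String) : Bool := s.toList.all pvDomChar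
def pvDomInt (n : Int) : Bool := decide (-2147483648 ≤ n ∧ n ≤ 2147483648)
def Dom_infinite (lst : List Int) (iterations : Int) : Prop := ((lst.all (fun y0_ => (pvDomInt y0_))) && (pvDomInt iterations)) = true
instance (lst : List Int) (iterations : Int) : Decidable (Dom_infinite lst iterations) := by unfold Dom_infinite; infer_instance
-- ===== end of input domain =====

-- B computes the result in bulk (whole cycles + remainder slice) instead of A's
-- one-element-at-a-time loop with iterator-reset; objective: alternative decomposition.

-- ===== PORT A =====
-- one loop step: try next(iter_lst) / on StopIteration reset to iter(lst) and take its head;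
-- the iterator is modelled by the list of elements not yet yielded; result accumulated as chars
def infiniteStep (lst : List Int) (st : List Char × List Int) : List Char × List Int :=
  match st.2 with
  | x :: rest => (st.1 ++ PySem.Int.toChars x, rest)
  | [] =>
    match lst with
    | y :: rest => (st.1 ++ PySem.Int.toChars y, rest)
    | [] => st   -- unreachable: guarded by `if lst:`

def infinite (lst : List Int) (iterations : Int) : String :=
  if lst ≠ [] then
    String.ofList ((PySem.List.pyRange 0 iterations 1).foldl
      (fun st _ => infiniteStep lst st) ([], lst)).1
  else ""

-- ===== PORT B =====
def infinite_alt (lst : List Int) (iterations : Int) : String :=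
  if lst = [] ∨ iterations ≤ 0 then ""
  else
    let q := PySem.Int.floordiv iterations (lst.length : Int)
    let r := PySem.Int.mod iterations (lst.length : Int)
    PySem.Str.join ""
      ((PySem.List.pyRepeat lst q ++ PySem.List.slice lst none (some r)).map PySem.Int.toStr)

-- ===== PRECONDITION & SPEC =====
def Spec_infinite (lst : List Int) (iterations : Int) (out : String) : Prop := out = infinite_alt lst iterations
instance (lst : List Int) (iterations : Int) (out : String) : Decidable (Spec_infinite lst iterations out) := by unfold Spec_infinite; infer_instance

-- ===== CLAIM (what is proved, stated in full; the proofs are below) =====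
def Claim_equal_infinite : Prop := ∀ (lst : List Int) (iterations : Int), Dom_infinite lst iterations → Spec_infinite lst iterations (infinite lst iterations)

-- ===== LEMMAS AND PROOFS =====

-- the sequence of elements A's loop yields: k steps through rem, resetting to lst on exhaustion
def cyc (lst : List Int) : List Int → Nat → List Int
  | _, 0 => []
  | x :: rest, k + 1 => x :: cyc lst rest k
  | [], k + 1 =>
    match lst with
    | y :: rest => y :: cyc lst rest k
    | [] => []

theorem foldA_eq_cyc (lst : List Int) (hl : lst ≠ []) :
    ∀ (L : List Int) (s : List Char) (rem : List Int),
      ((L.foldl (fun st _ => infiniteStep lst st) (s, rem)).1 : List Char)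
        = s ++ ((cyc lst rem L.length).map PySem.Int.toChars).flatten := by
  intro L
  induction L with
  | nil => intro s rem; simp [cyc]
  | cons a L ih =>
    intro s rem
    cases rem with
    | cons x rest =>
      rw [List.foldl_cons, ih]
      simp [infiniteStep, cyc]
    | nil =>
      cases lst with
      | nil => exact absurd rfl hl
      | cons y rest =>
        rw [List.foldl_cons, ih]
        simp [infiniteStep, cyc]

theorem cyc_reset (lst : List Int) (hl : lst ≠ []) (k : Nat) :
    cyc lst [] k = cyc lst lst k := by
  cases k with
  | zero => cases lst <;> simp [cyc]
  | succ k => cases lst with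
    | nil => exact absurd rfl hl
    | cons y rest => simp [cyc]

theorem cyc_take (lst : List Int) : ∀ (rem : List Int) (k : Nat), k ≤ rem.length →
    cyc lst rem k = rem.take k := by
  intro rem
  induction rem with
  | nil =>
    intro k hk
    have : k = 0 := by simpa using hk
    subst this; simp [cyc]
  | cons x rest ih =>
    intro k hk
    cases k with
    | zero => simp [cyc]
    | succ k => simp [cyc, ih k (by simpa using hk)]

theorem cyc_drop (lst : List Int) (hl : lst ≠ []) :
    ∀ (rem : List Int) (k : Nat), rem.length ≤ k →
      cyc lst rem k = rem ++ cyc lst lst (k - rem.length) := by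
  intro rem
  induction rem with
  | nil => intro k _; simpa using cyc_reset lst hl k
  | cons x rest ih =>
    intro k hk
    cases k with
    | zero => simp at hk
    | succ k =>
      have hk' : rest.length ≤ k := by simpa using hk
      simp only [cyc, List.cons_append, List.length_cons]
      rw [ih k hk']
      rw [Nat.succ_sub_succ]

theorem cyc_full (lst : List Int) (hl : lst ≠ []) (k : Nat) :
    cyc lst lst k
      = (List.replicate (k / lst.length) lst).flatten ++ lst.take (k % lst.length) := by
  induction k using Nat.strong_induction_on with
  | _ k ih =>
    have hn : 0 < lst.length := List.length_pos_iff.mpr hl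
    by_cases hk : k < lst.length
    · rw [cyc_take lst lst k (le_of_lt hk)]
      rw [Nat.div_eq_of_lt hk, Nat.mod_eq_of_lt hk]
      simp
    · have hk : lst.length ≤ k := by omega
      rw [cyc_drop lst hl lst k hk, ih (k - lst.length) (by omega)]
      have h1 : k / lst.length = (k - lst.length) / lst.length + 1 :=
        Nat.div_eq_sub_div hn hk
      have h2 : k % lst.length = (k - lst.length) % lst.length := by
        conv_lhs => rw [show k = (k - lst.length) + lst.length by omega]
        simp [Nat.add_mod_right]
      rw [h1, h2, List.replicate_succ, List.flatten_cons, List.append_assoc]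

theorem intercalate_nil_flatten {α : Type} (l : List (List α)) :
    List.intercalate ([] : List α) l = l.flatten := by
  induction l with
  | nil => simp [List.intercalate]
  | cons x l ih =>
    cases l with
    | nil => simp [List.intercalate]
    | cons y t =>
      simp only [List.intercalate] at *
      simp [List.intersperse] at *
      simpa using ih

theorem infinite_spec : Claim_equal_infinite := by
  intro lst iterations _
  unfold Spec_infinite infinite infinite_alt
  by_cases hl : lst = []
  · simp [hl]
  · by_cases hit : iterations ≤ 0
    · simp only [hl, hit, ne_eq, not_false_iff, or_true, if_pos]
      rw [PySem.List.pyRange_one_eq_nil (by omega)]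
      simp
    · have hit : 0 < iterations := by omega
      simp only [hl, ne_eq, not_false_iff, if_true, false_or, if_neg (by omega : ¬ iterations ≤ 0)]
      -- A side
      rw [foldA_eq_cyc lst hl]
      rw [PySem.List.length_pyRange_one]
      have hk : (iterations - 0).toNat = iterations.toNat := by omega
      rw [hk, cyc_full lst hl iterations.toNat]
      -- B side
      have hn : 0 < lst.length := List.length_pos_iff.mpr hl
      have hq : PySem.Int.floordiv iterations (lst.length : Int)
          = ((iterations.toNat / lst.length : Nat) : Int) := by
        conv_lhs => rw [show iterations = ((iterations.toNat : Nat) : Int) by omega]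
        exact PySem.Int.floordiv_natCast _ _
      have hr : PySem.Int.mod iterations (lst.length : Int)
          = ((iterations.toNat % lst.length : Nat) : Int) := by
        conv_lhs => rw [show iterations = ((iterations.toNat : Nat) : Int) by omega]
        exact PySem.Int.mod_natCast _ _
      rw [hq, hr, PySem.List.slice_to_natCast]
      apply String.toList_inj.mp
      rw [String.toList_ofList, PySem.Str.toList_join]
      show _ = PySem.Chars.join [] _
      have hmap : ∀ (l : List Int),
          l.map (String.toList ∘ PySem.Int.toStr) = l.map PySem.Int.toChars :=
        fun l => List.map_congr_left (fun x _ => PySem.Int.toList_toStr x)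
      unfold PySem.Chars.join PySem.List.pyRepeat
      rw [intercalate_nil_flatten, Int.toNat_natCast, List.map_map, hmap]
      simp
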